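-- pv_equiv track=rewrite | github.com/ayoubzulfiqar/Leeteration | HowManyApplesCanYouPutintotheBasket/how_many_apples_can_you_put_into_the_basket.py | maxNumberOfApples
-- ===== SOURCE A (Python) =====
-- def maxNumberOfApples(weight: list[int]) -> int:
--     weight.sort()
--
--     current_weight = 0
--     count = 0
--     basket_capacity = 5000
--
--     for w in weight:
--         if current_weight + w <= basket_capacity:
--             current_weight += w
--             count += 1
--         else:
--             break
--
--     return count
-- ===== SOURCE B (Python) =====
-- def maxNumberOfApples(weight: list[int]) -> int:
--     weight.sort()
--     sums = []
--     s = 0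
--     for w in weight:
--         s += w
--         sums.append(s)
--     return sum(1 for s in sums if s <= 5000)
-- ===== Notes on version B (the rewrite author's own statement) =====
-- stated objective: alternative
-- what changed: Replaces the short-circuiting greedy loop (break on first overflow) with a two-phase prefix-sum table plus a stateless count of prefix sums <= 5000; equivalent because on the sorted list the prefix sums exceed 5000 at most from one point on.
import Mathlib
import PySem

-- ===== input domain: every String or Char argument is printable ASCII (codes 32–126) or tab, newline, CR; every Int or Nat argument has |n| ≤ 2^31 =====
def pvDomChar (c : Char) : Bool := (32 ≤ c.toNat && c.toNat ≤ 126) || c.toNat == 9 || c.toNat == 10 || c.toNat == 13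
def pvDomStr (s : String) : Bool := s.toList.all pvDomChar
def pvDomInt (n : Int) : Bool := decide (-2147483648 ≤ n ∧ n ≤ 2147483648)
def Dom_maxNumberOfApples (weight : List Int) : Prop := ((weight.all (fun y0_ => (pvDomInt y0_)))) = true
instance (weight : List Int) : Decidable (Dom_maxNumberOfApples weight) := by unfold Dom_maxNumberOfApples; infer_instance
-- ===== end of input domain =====

-- B replaces A's break-on-overflow greedy loop by a prefix-sum table plus a stateless count
-- (same cost, different decomposition). Both Pythons sort `weight` in place; equivalence here
-- is about the return value.

-- ===== PORT A =====
-- greedy loop with break: carries current_weight and count, stops at the first w that overflows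
def pvGreedyA : List Int → Int → Int → Int
  | [], _, count => count
  | w :: ws, cur, count =>
    if cur + w ≤ 5000 then pvGreedyA ws (cur + w) (count + 1) else count

def maxNumberOfApples (weight : List Int) : Int :=
  pvGreedyA (PySem.List.sorted weight (fun x => x) false) 0 0

-- ===== PORT B =====
-- first pass: build the list of prefix sums (s is the running sum)
def pvPrefixSums : List Int → Int → List Int
  | [], _ => []
  | w :: ws, s => (s + w) :: pvPrefixSums ws (s + w)

-- second pass: count the prefix sums that are ≤ 5000
def maxNumberOfApples_alt (weight : List Int) : Int :=
  ((pvPrefixSums (PySem.List.sorted weight (fun x => x) false) 0).filter (fun s => s ≤ 5000)).length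

-- ===== PRECONDITION & SPEC =====
def Spec_maxNumberOfApples (weight : List Int) (out : Int) : Prop := out = maxNumberOfApples_alt weight
instance (weight : List Int) (out : Int) : Decidable (Spec_maxNumberOfApples weight out) := by unfold Spec_maxNumberOfApples; infer_instance

-- ===== CLAIM (what is proved, stated in full; the proofs are below) =====
def Claim_equal_maxNumberOfApples : Prop := ∀ (weight : List Int), Dom_maxNumberOfApples weight → Spec_maxNumberOfApples weight (maxNumberOfApples weight)

-- ===== LEMMAS AND PROOFS =====

-- After the running sum has exceeded the capacity, a tail of nonnegative elements
-- contributes no prefix sum ≤ 5000.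
theorem pv_noadd (l : List Int) (s : Int) (hs : 5000 < s) (hl : ∀ x ∈ l, 0 ≤ x) :
    (pvPrefixSums l s).filter (fun t => t ≤ 5000) = [] := by
  induction l generalizing s with
  | nil => simp [pvPrefixSums]
  | cons w ws ih =>
    have hw : 0 ≤ w := hl w (by simp)
    have : ¬ (s + w ≤ 5000) := by omega
    simp only [pvPrefixSums, List.filter_cons]
    rw [if_neg (by simpa using this)]
    exact ih (s + w) (by omega) (fun x hx => hl x (by simp [hx]))

-- Main invariant: on a sorted tail l, with running sum s that is ≤ 0 whenever some element of l
-- is negative, the greedy count equals count + number of prefix sums ≤ 5000.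
theorem pv_main (l : List Int) (s count : Int)
    (hsort : l.Pairwise (· ≤ ·)) (hneg : ∀ w ∈ l, w < 0 → s ≤ 0) :
    pvGreedyA l s count = count + ((pvPrefixSums l s).filter (fun t => t ≤ 5000)).length := by
  induction l generalizing s count with
  | nil => simp [pvGreedyA, pvPrefixSums]
  | cons w ws ih =>
    have hpw := (List.pairwise_cons.mp hsort)
    by_cases h : s + w ≤ 5000
    · simp only [pvGreedyA, pvPrefixSums, if_pos h, List.filter_cons]
      rw [if_pos (by simpa using h)]
      rw [ih (s + w) (count + 1) hpw.2
        (fun x hx hxneg => by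
          have hwx : w ≤ x := hpw.1 x hx
          have : w < 0 := by omega
          have := hneg w (by simp) this
          omega)]
      simp [List.length_cons]
      ring
    · -- break: w ≥ 0 (else s ≤ 0 and s + w < 0 ≤ 5000), so all later sums stay > 5000
      have hw0 : 0 ≤ w := by
        by_contra hw
        have := hneg w (by simp) (by omega)
        omega
      simp only [pvGreedyA, pvPrefixSums, if_neg h, List.filter_cons]
      rw [if_neg (by simpa using h)]
      rw [pv_noadd ws (s + w) (by omega) (fun x hx => le_trans hw0 (hpw.1 x hx))]
      simp

-- ===== VERDICT (by name: the statement is the Claim_ definition above) =====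
theorem maxNumberOfApples_spec : Claim_equal_maxNumberOfApples := by
  intro weight _
  unfold Spec_maxNumberOfApples maxNumberOfApples maxNumberOfApples_alt
  have hsort : (PySem.List.sorted weight (fun x => x) false).Pairwise (· ≤ ·) := by
    simpa using PySem.List.sorted_pairwise (xs := weight) (key := fun x => x)
  simpa using pv_main (PySem.List.sorted weight (fun x => x) false) 0 0 hsort
    (fun _ _ _ => le_refl 0)
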